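-- pv_equiv track=rewrite | github.com/workingdoge/premath | tools/ci/instruction_policy.py | _ensure_unique_string_list
-- ===== SOURCE A (Python) =====
-- from typing import Any, Dict, Iterable, List, Mapping
--
-- class PolicyValidationError(ValueError):
--     """Validation error with deterministic failure class."""
--
--     def __init__(self, failure_class: str, message: str) -> None:
--         self.failure_class = failure_class
--         super().__init__(message)
--
-- def _ensure_non_empty_string(value: Any, label: str, failure_class: str) -> str:
--     if not isinstance(value, str) or not value.strip():
--         raise PolicyValidationError(failure_class, f"{label} must be a non-empty string")
--     return value.strip()
--
-- def _ensure_unique_string_list(value: Any, label: str, failure_class: str) -> List[str]: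
--     if not isinstance(value, list) or not value:
--         raise PolicyValidationError(failure_class, f"{label} must be a non-empty list")
--     out: List[str] = []
--     for idx, item in enumerate(value):
--         out.append(_ensure_non_empty_string(item, f"{label}[{idx}]", failure_class))
--     deduped = sorted(set(out))
--     if len(deduped) != len(out):
--         raise PolicyValidationError(failure_class, f"{label} must not contain duplicates")
--     return deduped
-- ===== SOURCE B (Python) =====
-- from typing import Any, List
--
--
-- class PolicyValidationError(ValueError):
--     """Validation error with deterministic failure class."""
--
--     def __init__(self, failure_class: str, message: str) -> None:
--         self.failure_class = failure_class
--         super().__init__(message)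
--
--
-- def _ensure_non_empty_string(value: Any, label: str, failure_class: str) -> str:
--     if not isinstance(value, str) or not value.strip():
--         raise PolicyValidationError(failure_class, f"{label} must be a non-empty string")
--     return value.strip()
--
--
-- def _ensure_unique_string_list(value: Any, label: str, failure_class: str) -> List[str]:
--     if not isinstance(value, list) or not value:
--         raise PolicyValidationError(failure_class, f"{label} must be a non-empty list")
--     result: List[str] = []
--     for idx, item in enumerate(value):
--         item = _ensure_non_empty_string(item, f"{label}[{idx}]", failure_class)
--         pos = 0
--         while pos < len(result) and result[pos] < item:
--             pos += 1
--         if pos < len(result) and result[pos] == item: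
--             raise PolicyValidationError(failure_class, f"{label} must not contain duplicates")
--         result.insert(pos, item)
--     return result
-- ===== Notes on version B (the rewrite author's own statement) =====
-- stated objective: alternative
-- what changed: Single pass that validates each item and inserts it into a kept-sorted accumulator (insertion sort with inline duplicate detection at the insertion point), replacing A's staged build-all / set() / sorted() / length-compare pipeline.
import Mathlib
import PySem

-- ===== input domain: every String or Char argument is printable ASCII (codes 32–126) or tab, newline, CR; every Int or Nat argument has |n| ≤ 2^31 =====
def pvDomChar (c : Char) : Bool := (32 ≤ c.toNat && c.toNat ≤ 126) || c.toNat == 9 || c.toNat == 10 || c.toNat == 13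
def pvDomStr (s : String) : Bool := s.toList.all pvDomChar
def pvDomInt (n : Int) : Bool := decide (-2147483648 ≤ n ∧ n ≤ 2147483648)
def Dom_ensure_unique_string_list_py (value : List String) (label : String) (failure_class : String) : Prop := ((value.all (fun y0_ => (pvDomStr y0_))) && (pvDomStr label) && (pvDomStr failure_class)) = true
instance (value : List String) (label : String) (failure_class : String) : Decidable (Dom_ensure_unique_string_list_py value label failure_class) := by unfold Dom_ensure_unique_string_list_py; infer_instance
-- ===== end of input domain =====

-- B builds the sorted result in ONE pass, inserting each validated item into a kept-sorted
-- accumulator and detecting a duplicate at the insertion point, instead of A's staged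
-- build-all / set / sorted / length-compare pipeline (alternative algorithm; same result on Pre_).

-- ===== PORT A =====
-- A's validation loop: strip each item; none = PolicyValidationError on a blank item.
def pvValidate (value : List String) : Option (List String) :=
  match value with
  | [] => some []
  | s :: rest =>
      if PySem.Str.strip s = "" then none
      else (pvValidate rest).map (fun out => PySem.Str.strip s :: out)

def ensure_unique_string_list_py (value : List String) (label : String) (failure_class : String) : List String :=
  if value = [] then []          -- raise: non-empty-list error (excluded by Pre_)
  else
    match pvValidate value with
    | none => []                 -- raise inside the loop (excluded by Pre_)
    | some out =>
        let deduped := PySem.List.sorted (PySem.Set.ofList out) (fun x => x) false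
        if deduped.length ≠ out.length then []   -- raise: duplicates (excluded by Pre_)
        else deduped

-- ===== PORT B =====
-- B's inner while/insert: walk the sorted accumulator to the insertion point;
-- none = duplicate found there (PolicyValidationError, excluded by Pre_).
def pvInsert (item : String) (res : List String) : Option (List String) :=
  match res with
  | [] => some [item]
  | x :: rest =>
      if x < item then (pvInsert item rest).map (fun r => x :: r)
      else if x = item then none
      else some (item :: x :: rest)

-- B's single pass over value: strip-validate the item, then insert it into the accumulator.
def pvBuild (value : List String) (acc : List String) : Option (List String) :=
  match value with
  | [] => some acc
  | s :: rest =>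
      if PySem.Str.strip s = "" then none     -- raise: blank item (excluded by Pre_)
      else
        match pvInsert (PySem.Str.strip s) acc with
        | none => none                        -- raise: duplicate (excluded by Pre_)
        | some acc' => pvBuild rest acc'

def ensure_unique_string_list_py_alt (value : List String) (label : String) (failure_class : String) : List String :=
  if value = [] then []          -- raise: non-empty-list error (excluded by Pre_)
  else
    match pvBuild value [] with
    | none => []                 -- raise inside the loop (excluded by Pre_)
    | some result => result

-- ===== PRECONDITION & SPEC =====
-- Pre_ excludes exactly the inputs where A raises PolicyValidationError: an empty list,
-- an item that strips to the empty string, or duplicates among the stripped items.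
def Pre_ensure_unique_string_list_py (value : List String) (label : String) (failure_class : String) : Prop :=
  value ≠ [] ∧ (∀ s ∈ value, PySem.Str.strip s ≠ "") ∧ (value.map PySem.Str.strip).Nodup
instance (value : List String) (label : String) (failure_class : String) : Decidable (Pre_ensure_unique_string_list_py value label failure_class) := by unfold Pre_ensure_unique_string_list_py; infer_instance

def pvWitness_ensure_unique_string_list_py : List String × String × String := ([" b ", "a"], "L", "F")

def Spec_ensure_unique_string_list_py (value : List String) (label : String) (failure_class : String) (out : List String) : Prop := out = ensure_unique_string_list_py_alt value label failure_class
instance (value : List String) (label : String) (failure_class : String) (out : List String) : Decidable (Spec_ensure_unique_string_list_py value label failure_class out) := by unfold Spec_ensure_unique_string_list_py; infer_instance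

-- ===== CLAIM (what is proved, stated in full; the proofs are below) =====
def Claim_equal_ensure_unique_string_list_py : Prop := ∀ (value : List String) (label : String) (failure_class : String), Dom_ensure_unique_string_list_py value label failure_class → Pre_ensure_unique_string_list_py value label failure_class → Spec_ensure_unique_string_list_py value label failure_class (ensure_unique_string_list_py value label failure_class)

-- ===== LEMMAS AND PROOFS =====

lemma pvValidate_of_nonblank (value : List String)
    (h : ∀ s ∈ value, PySem.Str.strip s ≠ "") :
    pvValidate value = some (value.map PySem.Str.strip) := by
  induction value with
  | nil => rfl
  | cons s rest ih =>
      simp only [pvValidate, List.map_cons]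
      rw [if_neg (h s (by simp)), ih (fun t ht => h t (by simp [ht]))]
      rfl

-- Insertion into a strictly sorted list not containing the item succeeds, preserving
-- strict sortedness and permuting item :: res.
lemma pvInsert_spec (item : String) (res : List String)
    (hs : res.Pairwise (· < ·)) (hm : item ∉ res) :
    ∃ r, pvInsert item res = some r ∧ r.Perm (item :: res) ∧ r.Pairwise (· < ·) := by
  induction res with
  | nil => exact ⟨[item], rfl, List.Perm.refl _, by simp⟩
  | cons x rest ih =>
      have hne : x ≠ item := fun he => hm (he ▸ List.mem_cons_self)
      rcases List.pairwise_cons.mp hs with ⟨hx, hrest⟩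
      by_cases hlt : x < item
      · obtain ⟨r, hr, hperm, hsorted⟩ := ih hrest (fun hmem => hm (List.mem_cons_of_mem _ hmem))
        refine ⟨x :: r, ?_, ?_, ?_⟩
        · simp only [pvInsert]
          rw [if_pos hlt, hr]
          rfl
        · exact (hperm.cons x).trans (List.Perm.swap item x rest)
        · refine List.pairwise_cons.mpr ⟨?_, hsorted⟩
          intro b hb
          rcases List.mem_cons.mp ((hperm.mem_iff).mp hb) with hb | hb
          · exact hb ▸ hlt
          · exact hx b hb
      · refine ⟨item :: x :: rest, ?_, List.Perm.refl _, ?_⟩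
        · simp only [pvInsert]
          rw [if_neg hlt, if_neg hne]
        · refine List.pairwise_cons.mpr ⟨?_, hs⟩
          intro b hb
          have hxi : item < x := lt_of_le_of_ne (not_lt.mp hlt) (Ne.symm hne)
          rcases List.mem_cons.mp hb with hb | hb
          · exact hb ▸ hxi
          · exact hxi.trans (hx b hb)

-- The single pass succeeds on nonblank, globally-fresh items, yielding a strictly sorted
-- permutation of (stripped items ++ accumulator).
lemma pvBuild_spec (value : List String) (acc : List String)
    (hb : ∀ s ∈ value, PySem.Str.strip s ≠ "")
    (hnd : (value.map PySem.Str.strip).Nodup)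
    (hs : acc.Pairwise (· < ·))
    (hdisj : ∀ s ∈ value, PySem.Str.strip s ∉ acc) :
    ∃ r, pvBuild value acc = some r ∧ r.Perm (value.map PySem.Str.strip ++ acc) ∧
      r.Pairwise (· < ·) := by
  induction value generalizing acc with
  | nil => exact ⟨acc, rfl, by simp, hs⟩
  | cons s rest ih =>
      obtain ⟨racc, hins, hperm, hsorted⟩ :=
        pvInsert_spec (PySem.Str.strip s) acc hs (hdisj s List.mem_cons_self)
      rw [List.map_cons] at hnd
      rcases List.nodup_cons.mp hnd with ⟨hfresh, hndrest⟩
      obtain ⟨r, hr, hperm', hsorted'⟩ := ih racc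
        (fun t ht => hb t (List.mem_cons_of_mem _ ht)) hndrest hsorted
        (by
          intro t ht hmem
          rcases List.mem_cons.mp ((hperm.mem_iff).mp hmem) with h | h
          · exact hfresh (h ▸ List.mem_map_of_mem ht)
          · exact hdisj t (List.mem_cons_of_mem _ ht) h)
      refine ⟨r, ?_, ?_, hsorted'⟩
      · simp only [pvBuild]
        rw [if_neg (hb s List.mem_cons_self), hins]
        exact hr
      · refine hperm'.trans ?_
        simp only [List.map_cons, List.cons_append]
        exact (List.Perm.append_left _ hperm).trans List.perm_middle

-- ===== VERDICT (by name: the statement is the Claim_ definition above) =====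
theorem ensure_unique_string_list_py_spec : Claim_equal_ensure_unique_string_list_py := by
  intro value label failure_class _ hPre
  obtain ⟨hne, hblank, hnodup⟩ := hPre
  obtain ⟨r, hr, hperm, hsorted⟩ := pvBuild_spec value [] hblank hnodup (by simp) (by simp)
  have hperm' : r.Perm (value.map PySem.Str.strip) := by simpa using hperm
  have hEq : PySem.List.sorted (value.map PySem.Str.strip) (fun x => x) = r :=
    PySem.List.sorted_eq_of_perm_of_pairwise_lt _ _ _ hperm' (by simpa using hsorted)
  unfold Spec_ensure_unique_string_list_py
  unfold ensure_unique_string_list_py ensure_unique_string_list_py_alt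
  rw [if_neg hne, if_neg hne, pvValidate_of_nonblank value hblank, hr]
  simp only
  rw [PySem.Set.ofList_eq_self_of_nodup _ hnodup, hEq]
  simp [hperm'.length_eq]
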